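-- pv_equiv track=rewrite | github.com/dcceew-bdr/bdr-dq | dq/scoring_manager.py | calculate_subgroup_max_score
-- ===== SOURCE A (Python) =====
-- def calculate_subgroup_max_score(dictionary):
--     grouped_values = {}
--     for key, value in dictionary.items():
--         main_group, _ = key.split(':', 1)
--         if main_group in grouped_values:
--             grouped_values[main_group] = max(grouped_values[main_group], value)
--         else:
--             grouped_values[main_group] = value
--     return sum(grouped_values.values())
-- ===== SOURCE B (Python) =====
-- def calculate_subgroup_max_score(dictionary):
--     # Pass 1: collect the distinct main-group prefixes in first-occurrence order.
--     prefixes = []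
--     for key in dictionary:
--         main_group, _ = key.split(':', 1)
--         if main_group not in prefixes:
--             prefixes.append(main_group)
--     # Pass 2: for each prefix, rescan the whole dictionary for that group's max.
--     total = 0
--     for p in prefixes:
--         total += max(v for k, v in dictionary.items() if k.split(':', 1)[0] == p)
--     return total
-- ===== Notes on version B (the rewrite author's own statement) =====
-- stated objective: alternative
-- what changed: A makes one pass threading a per-group running max in a dict and sums its values; B uses no per-group accumulator at all: it first collects the distinct prefixes in order, then for each prefix rescans the whole input to take that group's max (O(n*g) nested scans instead of O(n) hashing).
import Mathlib
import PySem

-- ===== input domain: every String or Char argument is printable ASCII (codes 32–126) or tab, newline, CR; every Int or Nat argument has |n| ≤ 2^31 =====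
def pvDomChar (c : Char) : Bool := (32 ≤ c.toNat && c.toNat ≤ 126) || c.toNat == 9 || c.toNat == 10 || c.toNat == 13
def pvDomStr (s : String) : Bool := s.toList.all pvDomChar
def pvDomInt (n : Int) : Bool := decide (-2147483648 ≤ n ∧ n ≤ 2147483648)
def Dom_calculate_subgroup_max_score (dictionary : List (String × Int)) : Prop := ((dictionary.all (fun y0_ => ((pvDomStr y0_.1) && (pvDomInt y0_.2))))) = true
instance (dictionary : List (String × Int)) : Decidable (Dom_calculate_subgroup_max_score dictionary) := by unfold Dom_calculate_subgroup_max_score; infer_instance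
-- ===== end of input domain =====

-- B replaces A's single pass with a dict of running maxima by a no-dict nested-scan shape:
-- collect the distinct prefixes in order, then rescan the whole input per prefix for its max.


-- ===== PORT A =====
-- main_group, _ = key.split(':', 1)  (the unpack raises ValueError when there is no ':';
-- Pre_ excludes that, so inside Pre_ the split has exactly 2 parts and main_group is its head)
def pvMainGroup (key : String) : String :=
  ((PySem.Str.splitMax? key ":" 1).getD []).headD ""

-- loop body of A: running max per main_group kept in a dict
def pvStepA (g : PySem.Dict String Int) (kv : String × Int) : PySem.Dict String Int :=
  let main_group := pvMainGroup kv.1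
  match g.get? main_group with
  | some prev => g.insert main_group (max prev kv.2)
  | none      => g.insert main_group kv.2

def calculate_subgroup_max_score (dictionary : List (String × Int)) : Int :=
  (dictionary.foldl pvStepA PySem.Dict.empty).values.sum

-- ===== PORT B =====
-- pass 1 of B: 'if main_group not in prefixes: prefixes.append(main_group)' is PySem.Set.add
-- pass 2 of B: for each prefix, max over the values of the matching entries of the whole input
def calculate_subgroup_max_score_alt (dictionary : List (String × Int)) : Int :=
  let prefixes : PySem.Set String :=
    dictionary.foldl (fun s kv => PySem.Set.add s (pvMainGroup kv.1)) PySem.Set.empty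
  prefixes.foldl
    (fun total p =>
      total + (PySem.List.max?
        ((dictionary.filter (fun kv => pvMainGroup kv.1 == p)).map (·.2))
        (fun y => y)).getD 0)
    0

-- ===== PRECONDITION & SPEC =====
-- Pre_ excludes exactly the inputs where A raises ValueError: a key with no ':' makes
-- "main_group, _ = key.split(':', 1)" an unpack of a 1-element list.
def Pre_calculate_subgroup_max_score (dictionary : List (String × Int)) : Prop :=
  ∀ p ∈ dictionary, PySem.Str.isIn ":" p.1 = true
instance (dictionary : List (String × Int)) : Decidable (Pre_calculate_subgroup_max_score dictionary) := by unfold Pre_calculate_subgroup_max_score; infer_instance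

def pvWitness_calculate_subgroup_max_score : (List (String × Int)) :=
  [("a:x", 3), ("b:y", 5), ("a:z", 7)]

def Spec_calculate_subgroup_max_score (dictionary : List (String × Int)) (out : Int) : Prop := out = calculate_subgroup_max_score_alt dictionary
instance (dictionary : List (String × Int)) (out : Int) : Decidable (Spec_calculate_subgroup_max_score dictionary out) := by unfold Spec_calculate_subgroup_max_score; infer_instance

-- ===== CLAIM (what is proved, stated in full; the proofs are below) =====
def Claim_equal_calculate_subgroup_max_score : Prop := ∀ (dictionary : List (String × Int)), Dom_calculate_subgroup_max_score dictionary → Pre_calculate_subgroup_max_score dictionary → Spec_calculate_subgroup_max_score dictionary (calculate_subgroup_max_score dictionary)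

-- ===== LEMMAS AND PROOFS =====

-- A's branch-on-membership step is an insert at the prefix key (needed to apply the keys lemmas)
lemma stepA_eq_insert (g : PySem.Dict String Int) (kv : String × Int) :
    pvStepA g kv = g.insert (pvMainGroup kv.1)
      (match g.get? (pvMainGroup kv.1) with
       | some prev => max prev kv.2
       | none => kv.2) := by
  unfold pvStepA
  cases h : g.get? (pvMainGroup kv.1) <;> simp [h]

-- option-threaded max accumulation
def pvComb (acc : Option Int) (v : Int) : Option Int :=
  match acc with
  | some m => some (max m v)
  | none   => some v

lemma foldl_pvComb_some (vs : List Int) (m : Int) :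
    vs.foldl pvComb (some m) = some (vs.foldl max m) := by
  induction vs generalizing m with
  | nil => rfl
  | cons v t ih => simp [List.foldl, pvComb, ih]

-- characterisation of A's grouping loop at a fixed key
lemma getA (l : List (String × Int)) (d : PySem.Dict String Int) (c : String) :
    (l.foldl pvStepA d).get? c =
      ((l.filter (fun p => pvMainGroup p.1 == c)).map (·.2)).foldl pvComb (d.get? c) := by
  induction l generalizing d with
  | nil => rfl
  | cons kv t ih =>
    simp only [List.foldl, ih]
    by_cases hk : pvMainGroup kv.1 = c
    · have h1 : (pvStepA d kv).get? c = pvComb (d.get? c) kv.2 := by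
        rw [stepA_eq_insert, hk]
        cases h : d.get? c <;> simp [PySem.Dict.get?_insert_self, pvComb]
      simp [hk, h1]
    · have h1 : (pvStepA d kv).get? c = d.get? c := by
        rw [stepA_eq_insert]
        exact PySem.Dict.get?_insert_of_ne d _ (fun hh => hk hh.symm)
      simp [hk, h1]

theorem calculate_subgroup_max_score_spec : Claim_equal_calculate_subgroup_max_score := by
  intro dictionary _ _
  unfold Spec_calculate_subgroup_max_score
  unfold calculate_subgroup_max_score calculate_subgroup_max_score_alt
  set dA := dictionary.foldl pvStepA PySem.Dict.empty with hdA
  -- A's dict keys = B's prefix list: the distinct prefixes in first-occurrence order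
  have hprefB : dictionary.foldl (fun s kv => PySem.Set.add s (pvMainGroup kv.1))
      PySem.Set.empty = PySem.Set.ofList (dictionary.map (fun p => pvMainGroup p.1)) := by
    rw [PySem.Set.ofList_eq_foldl, List.foldl_map]
    rfl
  have hkeysA : dA.keys = PySem.Set.ofList (dictionary.map (fun p => pvMainGroup p.1)) := by
    rw [hdA]
    have : dictionary.foldl pvStepA PySem.Dict.empty =
        dictionary.foldl (fun g kv => g.insert (pvMainGroup kv.1)
          (match g.get? (pvMainGroup kv.1) with
           | some prev => max prev kv.2
           | none => kv.2)) PySem.Dict.empty := by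
      congr 1
      funext g kv
      exact stepA_eq_insert g kv
    rw [this, PySem.Dict.keys_foldl_insert_key]
    rw [show (PySem.Dict.empty (κ := String) (ν := Int)).keys = ([] : List String) from rfl]
    exact PySem.Set.update_nil_left _
  have hndA : dA.keys.Nodup := by rw [hkeysA]; exact PySem.Set.nodup_ofList _
  rw [hprefB, PySem.List.foldl_add, PySem.Dict.values_eq_map_keys dA hndA 0, hkeysA,
      zero_add]
  congr 1
  apply List.map_congr_left
  intro k hk
  -- k is the prefix of some entry, so its group of values is nonempty
  have hkmem : k ∈ dictionary.map (fun p => pvMainGroup p.1) :=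
    (PySem.Set.mem_ofList _ _).mp hk
  obtain ⟨p, hp, hpk⟩ := List.mem_map.mp hkmem
  set vals := (dictionary.filter (fun q => pvMainGroup q.1 == k)).map (·.2) with hvals
  have hvne : vals ≠ [] := by
    simp only [hvals, ne_eq, List.map_eq_nil_iff, List.filter_eq_nil_iff, not_forall]
    exact ⟨p, hp, by simp [hpk]⟩
  obtain ⟨v, vs, hv⟩ := List.exists_cons_of_ne_nil hvne
  have hAk : dA.get? k = some (vs.foldl max v) := by
    rw [hdA, getA]
    show vals.foldl pvComb ((PySem.Dict.empty (κ := String) (ν := Int)).get? k) = _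
    rw [hv]
    exact foldl_pvComb_some vs v
  show dA.getD k 0 = (PySem.List.max? vals (fun y => y)).getD 0
  rw [hv, PySem.List.max?_id_cons, PySem.Dict.getD_eq_get?_getD, hAk]
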